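-- pv_equiv track=rewrite | github.com/sundar91/dsa | PatternMatching/BoringString.py | solve
-- ===== SOURCE A (Python) =====
-- def check(a, b):
--     c = a + b
--     for i in range(1, len(c)):
--         res = ord(c[i]) - ord(c[i - 1])
--         if res < 0:
--             res = (-1) * res
--         if res == 1:
--             return 0
--     return 1
--
-- def solve(A):
--     odd = ""
--     even = ""
--     for a in A:
--         if ord(a) % 2:
--             odd += a
--         else:
--             even += a
--     o = sorted(odd)
--     e = sorted(even)
--     if check(o, e):
--         return 1
--     elif check(e, o):
--         return 1
--     else:
--         return 0
-- ===== SOURCE B (Python) =====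
-- def solve(A):
--     min_odd = max_odd = min_even = max_even = None
--     for ch in A:
--         v = ord(ch)
--         if v % 2:
--             if min_odd is None:
--                 min_odd = max_odd = v
--             else:
--                 if v < min_odd:
--                     min_odd = v
--                 if v > max_odd:
--                     max_odd = v
--         else:
--             if min_even is None:
--                 min_even = max_even = v
--             else:
--                 if v < min_even:
--                     min_even = v
--                 if v > max_even:
--                     max_even = v
--     if min_odd is None or min_even is None:
--         return 1
--     if abs(max_odd - min_even) == 1 and abs(max_even - min_odd) == 1:
--         return 0
--     return 1
-- ===== Notes on version B (the rewrite author's own statement) =====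
-- stated objective: faster
-- what changed: B replaces building, sorting and scanning the two parity-grouped strings by a single pass that tracks min/max ASCII code of the odd and even groups: inside each sorted same-parity group adjacent differences are even, so only the two possible junctions (max-odd vs min-even and max-even vs min-odd) can have absolute difference 1.
import Mathlib
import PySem

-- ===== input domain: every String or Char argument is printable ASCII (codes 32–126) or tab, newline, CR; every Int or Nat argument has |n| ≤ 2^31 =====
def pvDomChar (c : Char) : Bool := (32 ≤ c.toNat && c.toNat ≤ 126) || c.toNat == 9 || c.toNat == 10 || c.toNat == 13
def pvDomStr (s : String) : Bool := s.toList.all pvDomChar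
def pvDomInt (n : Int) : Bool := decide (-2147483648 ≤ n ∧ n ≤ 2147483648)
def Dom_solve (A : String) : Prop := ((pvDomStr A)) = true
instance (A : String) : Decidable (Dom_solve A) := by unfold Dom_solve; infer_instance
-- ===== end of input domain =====

-- B replaces A's build/sort/scan of the two parity groups by a single pass tracking min/max codes of each group.

-- ===== PORT A =====
def ordI (c : Char) : Int := (c.toNat : Int)

-- the value |ord c[j] - ord c[j-1]| computed exactly as check's loop body computes it
def badv (c : List Char) (j : Nat) : Int :=
  let res := ordI (c.getD j 'a') - ordI (c.getD (j - 1) 'a')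
  if res < 0 then -res else res

def checkGo (c : List Char) (i : Nat) : Int :=
  if i < c.length then
    if badv c i = 1 then 0 else checkGo c (i + 1)
  else 1
termination_by c.length - i

def check (a b : List Char) : Int := checkGo (a ++ b) 1

def solve (A : String) : Int :=
  let p := A.toList.foldl
    (fun (p : List Char × List Char) ch =>
      if ch.toNat % 2 ≠ 0 then (p.1 ++ [ch], p.2) else (p.1, p.2 ++ [ch])) ([], [])
  let o := PySem.List.sorted p.1 (fun x => x) false
  let e := PySem.List.sorted p.2 (fun x => x) false
  if check o e ≠ 0 then 1 else if check e o ≠ 0 then 1 else 0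

-- ===== PORT B =====
def mmStep (s : Option (Int × Int)) (v : Int) : Option (Int × Int) :=
  match s with
  | none => some (v, v)
  | some (mn, mx) => some (if v < mn then v else mn, if v > mx then v else mx)

def solve_alt (A : String) : Int :=
  let st := A.toList.foldl
    (fun (st : Option (Int × Int) × Option (Int × Int)) ch =>
      if ch.toNat % 2 ≠ 0 then (mmStep st.1 (ordI ch), st.2)
      else (st.1, mmStep st.2 (ordI ch))) (none, none)
  match st.1, st.2 with
  | some (mno, mxo), some (mne, mxe) =>
      if |mxo - mne| = 1 ∧ |mxe - mno| = 1 then 0 else 1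
  | _, _ => 1

-- ===== PRECONDITION & SPEC =====
def Spec_solve (A : String) (out : Int) : Prop := out = solve_alt A
instance (A : String) (out : Int) : Decidable (Spec_solve A out) := by unfold Spec_solve; infer_instance

-- ===== CLAIM (what is proved, stated in full; the proofs are below) =====
def Claim_equal_solve : Prop := ∀ (A : String), Dom_solve A → Spec_solve A (solve A)

-- ===== LEMMAS AND PROOFS =====

lemma if_neg_abs (r : Int) : (if r < 0 then -r else r) = |r| := by
  split_ifs with h
  · exact (abs_of_neg h).symm
  · exact (abs_of_nonneg (not_lt.mp h)).symm

lemma checkGo_eq_one (c : List Char) :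
    ∀ n i, c.length ≤ i + n → (∀ j, i ≤ j → j < c.length → badv c j ≠ 1) →
    checkGo c i = 1 := by
  intro n
  induction n with
  | zero =>
    intro i h _
    unfold checkGo
    rw [if_neg (by omega)]
  | succ n ih =>
    intro i hn hb
    unfold checkGo
    by_cases h : i < c.length
    · rw [if_pos h, if_neg (hb i le_rfl h)]
      exact ih (i + 1) (by omega) (fun j h1 h2 => hb j (by omega) h2)
    · rw [if_neg h]

lemma checkGo_eq_zero (c : List Char) :
    ∀ n i, c.length ≤ i + n → (∃ j, i ≤ j ∧ j < c.length ∧ badv c j = 1) →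
    checkGo c i = 0 := by
  intro n
  induction n with
  | zero =>
    intro i h hex
    obtain ⟨j, hj1, hj2, _⟩ := hex
    omega
  | succ n ih =>
    intro i hn hex
    obtain ⟨j, hj1, hj2, hbj⟩ := hex
    unfold checkGo
    rw [if_pos (by omega)]
    by_cases hi : badv c i = 1
    · rw [if_pos hi]
    · rw [if_neg hi]
      refine ih (i + 1) (by omega) ⟨j, ?_, hj2, hbj⟩
      rcases Nat.eq_or_lt_of_le hj1 with h | h
      · exact absurd (h ▸ hbj) hi
      · omega

def oddsOf (l : List Char) : List Char := l.filter (fun c => decide (c.toNat % 2 ≠ 0))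
def evensOf (l : List Char) : List Char := l.filter (fun c => !decide (c.toNat % 2 ≠ 0))

lemma foldA_eq (xs : List Char) (o e : List Char) :
    xs.foldl (fun (p : List Char × List Char) ch =>
      if ch.toNat % 2 ≠ 0 then (p.1 ++ [ch], p.2) else (p.1, p.2 ++ [ch])) (o, e)
    = (o ++ oddsOf xs, e ++ evensOf xs) := by
  induction xs generalizing o e with
  | nil => simp [oddsOf, evensOf]
  | cons c t ih =>
    by_cases h : c.toNat % 2 ≠ 0
    · simp only [List.foldl_cons, if_pos h, ih, oddsOf, evensOf, List.filter_cons,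
        decide_eq_true h, Bool.not_true]
      simp
    · simp only [List.foldl_cons, if_neg h, ih, oddsOf, evensOf, List.filter_cons]
      simp [h]

def mfold (l : List Char) (s : Option (Int × Int)) : Option (Int × Int) :=
  l.foldl (fun s c => mmStep s (ordI c)) s

lemma foldB_eq (xs : List Char) (s1 s2 : Option (Int × Int)) :
    xs.foldl (fun (st : Option (Int × Int) × Option (Int × Int)) ch =>
      if ch.toNat % 2 ≠ 0 then (mmStep st.1 (ordI ch), st.2)
      else (st.1, mmStep st.2 (ordI ch))) (s1, s2)
    = (mfold (oddsOf xs) s1, mfold (evensOf xs) s2) := by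
  induction xs generalizing s1 s2 with
  | nil => simp [oddsOf, evensOf, mfold]
  | cons c t ih =>
    by_cases h : c.toNat % 2 ≠ 0
    · have h1 : c.toNat % 2 = 1 := Nat.mod_two_ne_zero.mp h
      simp only [List.foldl_cons, if_pos h, ih]
      simp [oddsOf, evensOf, mfold, h1]
    · have h0 : c.toNat % 2 = 0 := by omega
      simp only [List.foldl_cons, if_neg h, ih]
      simp [oddsOf, evensOf, mfold, h0]

lemma mfold_some (l : List Char) (mn mx : Int) :
    ∃ mn' mx', mfold l (some (mn, mx)) = some (mn', mx') ∧
      (mn' = mn ∨ ∃ a ∈ l, mn' = ordI a) ∧ (mx' = mx ∨ ∃ b ∈ l, mx' = ordI b) ∧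
      mn' ≤ mn ∧ mx ≤ mx' ∧ (∀ x ∈ l, mn' ≤ ordI x ∧ ordI x ≤ mx') := by
  induction l generalizing mn mx with
  | nil => exact ⟨mn, mx, rfl, Or.inl rfl, Or.inl rfl, le_rfl, le_rfl, by simp⟩
  | cons c t ih =>
    have hstep : mfold (c :: t) (some (mn, mx))
        = mfold t (some ((if ordI c < mn then ordI c else mn),
                         (if ordI c > mx then ordI c else mx))) := by
      simp [mfold, mmStep]
    obtain ⟨mn', mx', heq, hmn, hmx, hle1, hle2, hall⟩ :=
      ih (if ordI c < mn then ordI c else mn) (if ordI c > mx then ordI c else mx)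
    refine ⟨mn', mx', hstep ▸ heq, ?_, ?_, ?_, ?_, ?_⟩
    · rcases hmn with h | ⟨a, ha, h⟩
      · split_ifs at h with hc
        · exact Or.inr ⟨c, List.mem_cons_self .., h⟩
        · exact Or.inl h
      · exact Or.inr ⟨a, List.mem_cons_of_mem _ ha, h⟩
    · rcases hmx with h | ⟨b, hb, h⟩
      · split_ifs at h with hc
        · exact Or.inr ⟨c, List.mem_cons_self .., h⟩
        · exact Or.inl h
      · exact Or.inr ⟨b, List.mem_cons_of_mem _ hb, h⟩
    · have := hle1; split_ifs at this <;> omega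
    · have := hle2; split_ifs at this <;> omega
    · intro x hx
      rcases List.mem_cons.mp hx with rfl | hx
      · constructor
        · have := hle1; split_ifs at this <;> omega
        · have := hle2; split_ifs at this <;> omega
      · exact hall x hx

lemma mfold_spec (l : List Char) (hl : l ≠ []) :
    ∃ mn mx, mfold l none = some (mn, mx) ∧
      (∃ a ∈ l, mn = ordI a) ∧ (∃ b ∈ l, mx = ordI b) ∧
      (∀ x ∈ l, mn ≤ ordI x ∧ ordI x ≤ mx) := by
  cases l with
  | nil => exact absurd rfl hl
  | cons c t =>
    have hstep : mfold (c :: t) none = mfold t (some (ordI c, ordI c)) := by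
      simp [mfold, mmStep]
    obtain ⟨mn, mx, heq, hmn, hmx, hle1, hle2, hall⟩ := mfold_some t (ordI c) (ordI c)
    refine ⟨mn, mx, hstep ▸ heq, ?_, ?_, ?_⟩
    · rcases hmn with h | ⟨a, ha, h⟩
      · exact ⟨c, List.mem_cons_self .., h⟩
      · exact ⟨a, List.mem_cons_of_mem _ ha, h⟩
    · rcases hmx with h | ⟨b, hb, h⟩
      · exact ⟨c, List.mem_cons_self .., h⟩
      · exact ⟨b, List.mem_cons_of_mem _ hb, h⟩
    · intro x hx
      rcases List.mem_cons.mp hx with rfl | hx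
      · exact ⟨hle1, hle2⟩
      · exact hall x hx

lemma ordI_mono {a b : Char} (h : a ≤ b) : ordI a ≤ ordI b := by
  have h2 : a.toNat ≤ b.toNat := h
  unfold ordI
  exact_mod_cast h2

lemma sorted_last_max (l : List Char) (hl : l ≠ []) (mx : Int)
    (hmem : ∃ b ∈ l, mx = ordI b) (hub : ∀ x ∈ l, ordI x ≤ mx) :
    ordI ((PySem.List.sorted l (fun x => x) false).getD
      ((PySem.List.sorted l (fun x => x) false).length - 1) 'a') = mx := by
  set s := PySem.List.sorted l (fun x => x) false with hs
  have hlen : s.length = l.length := PySem.List.length_sorted ..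
  have hpos : 0 < s.length := by
    rw [hlen]; exact List.length_pos_of_ne_nil hl
  have hget : s.getD (s.length - 1) 'a' = s[s.length - 1]'(by omega) :=
    List.getD_eq_getElem s 'a' (by omega)
  rw [hget]
  obtain ⟨b, hb, rfl⟩ := hmem
  have hbs : b ∈ s := (PySem.List.mem_sorted ..).mpr hb
  obtain ⟨k, hk, hbk⟩ := List.mem_iff_getElem.mp hbs
  apply le_antisymm
  · apply hub
    exact (PySem.List.mem_sorted ..).mp (List.getElem_mem _)
  · have h2 := ordI_mono (PySem.List.sorted_id_getElem_mono l (p := k) (q := s.length - 1) (by omega) (by simp only [← hs]; omega))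
    rw [hbk] at h2
    exact h2

lemma sorted_head_min (l : List Char) (hl : l ≠ []) (mn : Int)
    (hmem : ∃ a ∈ l, mn = ordI a) (hlb : ∀ x ∈ l, mn ≤ ordI x) :
    ordI ((PySem.List.sorted l (fun x => x) false).getD 0 'a') = mn := by
  set s := PySem.List.sorted l (fun x => x) false with hs
  have hlen : s.length = l.length := PySem.List.length_sorted ..
  have hpos : 0 < s.length := by
    rw [hlen]; exact List.length_pos_of_ne_nil hl
  have hget : s.getD 0 'a' = s[0]'hpos := List.getD_eq_getElem s 'a' hpos
  rw [hget]
  obtain ⟨b, hb, rfl⟩ := hmem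
  have hbs : b ∈ s := (PySem.List.mem_sorted ..).mpr hb
  obtain ⟨k, hk, hbk⟩ := List.mem_iff_getElem.mp hbs
  apply le_antisymm
  · have h2 := ordI_mono (PySem.List.sorted_id_getElem_mono l (p := 0) (q := k) (by omega) (by simp only [← hs]; omega))
    rw [hbk] at h2
    exact h2
  · apply hlb
    exact (PySem.List.mem_sorted ..).mp (List.getElem_mem _)

lemma badv_ne_one_parity (c : List Char) (j : Nat)
    (hpar : (c.getD j 'a').toNat % 2 = (c.getD (j - 1) 'a').toNat % 2) : badv c j ≠ 1 := by
  simp only [badv, ordI]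
  split_ifs <;> omega

lemma badv_boundary (u v : List Char) (hu : u ≠ []) :
    badv (u ++ v) u.length = |ordI (v.getD 0 'a') - ordI (u.getD (u.length - 1) 'a')| := by
  have h1 : (u ++ v).getD u.length 'a' = v.getD 0 'a' := by
    rw [List.getD_append_right u v 'a' u.length le_rfl, Nat.sub_self]
  have hul : 0 < u.length := List.length_pos_of_ne_nil hu
  have h2 : (u ++ v).getD (u.length - 1) 'a' = u.getD (u.length - 1) 'a' :=
    List.getD_append u v 'a' _ (by omega)
  simp only [badv, h1, h2]
  exact if_neg_abs _

lemma check_eq_one (u v : List Char) (pu pv : Nat)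
    (hu : ∀ x ∈ u, x.toNat % 2 = pu) (hv : ∀ x ∈ v, x.toNat % 2 = pv)
    (hb : u = [] ∨ v = [] ∨ badv (u ++ v) u.length ≠ 1) : check u v = 1 := by
  apply checkGo_eq_one (u ++ v) (u ++ v).length 1 (by omega)
  intro j hj1 hj2
  rw [List.length_append] at hj2
  rcases Nat.lt_trichotomy j u.length with hlt | heq | hgt
  · apply badv_ne_one_parity
    rw [List.getD_append u v 'a' j hlt, List.getD_append u v 'a' (j - 1) (by omega)]
    have m1 : u.getD j 'a' ∈ u := by
      rw [List.getD_eq_getElem u 'a' hlt]; exact List.getElem_mem _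
    have m2 : u.getD (j - 1) 'a' ∈ u := by
      rw [List.getD_eq_getElem u 'a' (show j - 1 < u.length by omega)]; exact List.getElem_mem _
    rw [hu _ m1, hu _ m2]
  · rcases hb with h | h | h
    · subst h; simp at heq; omega
    · subst h; simp at hj2; omega
    · exact heq ▸ h
  · apply badv_ne_one_parity
    rw [List.getD_append_right u v 'a' j (by omega),
        List.getD_append_right u v 'a' (j - 1) (by omega)]
    have m1 : v.getD (j - u.length) 'a' ∈ v := by
      rw [List.getD_eq_getElem v 'a' (show j - u.length < v.length by omega)]
      exact List.getElem_mem _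
    have m2 : v.getD (j - 1 - u.length) 'a' ∈ v := by
      rw [List.getD_eq_getElem v 'a' (show j - 1 - u.length < v.length by omega)]
      exact List.getElem_mem _
    rw [hv _ m1, hv _ m2]

lemma check_eq_zero (u v : List Char) (hu : u ≠ []) (hv : v ≠ [])
    (hb : badv (u ++ v) u.length = 1) : check u v = 0 := by
  apply checkGo_eq_zero (u ++ v) (u ++ v).length 1 (by omega)
  have h1 : 0 < u.length := List.length_pos_of_ne_nil hu
  have h2 : 0 < v.length := List.length_pos_of_ne_nil hv
  exact ⟨u.length, by omega, by rw [List.length_append]; omega, hb⟩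

lemma odd_parity (l : List Char) : ∀ x ∈ oddsOf l, x.toNat % 2 = 1 := by
  intro x hx
  have := (List.mem_filter.mp hx).2
  simp at this
  omega

lemma even_parity (l : List Char) : ∀ x ∈ evensOf l, x.toNat % 2 = 0 := by
  intro x hx
  have := (List.mem_filter.mp hx).2
  simp at this
  omega

lemma sorted_odd_parity (l : List Char) :
    ∀ x ∈ PySem.List.sorted (oddsOf l) (fun x => x) false, x.toNat % 2 = 1 :=
  fun x hx => odd_parity l x ((PySem.List.mem_sorted ..).mp hx)

lemma sorted_even_parity (l : List Char) :
    ∀ x ∈ PySem.List.sorted (evensOf l) (fun x => x) false, x.toNat % 2 = 0 :=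
  fun x hx => even_parity l x ((PySem.List.mem_sorted ..).mp hx)

-- ===== VERDICT (by name: the statement is the Claim_ definition above) =====
theorem solve_spec : Claim_equal_solve := by
  intro A _
  unfold Spec_solve solve solve_alt
  rw [foldA_eq, foldB_eq]
  simp only [List.nil_append]
  by_cases h1 : oddsOf A.toList = []
  · -- no odd chars: B's odd state is none → 1; A: both checks pass (single-parity strings)
    rw [h1]
    have c1 : check (PySem.List.sorted ([] : List Char) (fun x => x) false)
        (PySem.List.sorted (evensOf A.toList) (fun x => x) false) = 1 := by
      apply check_eq_one _ _ 1 0 (by simp [PySem.List.sorted]) (sorted_even_parity A.toList)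
      left
      simp [PySem.List.sorted]
    have c2 : check (PySem.List.sorted (evensOf A.toList) (fun x => x) false)
        (PySem.List.sorted ([] : List Char) (fun x => x) false) = 1 := by
      apply check_eq_one _ _ 0 1 (sorted_even_parity A.toList) (by simp [PySem.List.sorted])
      right; left
      simp [PySem.List.sorted]
    simp [c1, mfold]
  · by_cases h2 : evensOf A.toList = []
    · rw [h2]
      have c1 : check (PySem.List.sorted (oddsOf A.toList) (fun x => x) false)
          (PySem.List.sorted ([] : List Char) (fun x => x) false) = 1 := by
        apply check_eq_one _ _ 1 0 (sorted_odd_parity A.toList) (by simp [PySem.List.sorted])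
        right; left
        simp [PySem.List.sorted]
      have c2 : check (PySem.List.sorted ([] : List Char) (fun x => x) false)
          (PySem.List.sorted (oddsOf A.toList) (fun x => x) false) = 1 := by
        apply check_eq_one _ _ 0 1 (by simp [PySem.List.sorted]) (sorted_odd_parity A.toList)
        left
        simp [PySem.List.sorted]
      simp [c1, mfold]
    · -- both groups nonempty
      obtain ⟨mno, mxo, hmo, hmno, hmxo, hallo⟩ := mfold_spec _ h1
      obtain ⟨mne, mxe, hme, hmne, hmxe, halle⟩ := mfold_spec _ h2
      set o := PySem.List.sorted (oddsOf A.toList) (fun x => x) false with ho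
      set e := PySem.List.sorted (evensOf A.toList) (fun x => x) false with he
      have hone : o ≠ [] := by
        rw [ho]; rw [Ne, PySem.List.sorted_eq_nil_iff]; exact h1
      have hene : e ≠ [] := by
        rw [he]; rw [Ne, PySem.List.sorted_eq_nil_iff]; exact h2
      have hlasto : ordI (o.getD (o.length - 1) 'a') = mxo := by
        rw [ho]
        exact sorted_last_max _ h1 mxo hmxo (fun x hx => (hallo x hx).2)
      have hheado : ordI (o.getD 0 'a') = mno := by
        rw [ho]
        exact sorted_head_min _ h1 mno hmno (fun x hx => (hallo x hx).1)
      have hlaste : ordI (e.getD (e.length - 1) 'a') = mxe := by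
        rw [he]
        exact sorted_last_max _ h2 mxe hmxe (fun x hx => (halle x hx).2)
      have hheade : ordI (e.getD 0 'a') = mne := by
        rw [he]
        exact sorted_head_min _ h2 mne hmne (fun x hx => (halle x hx).1)
      have hb1 : badv (o ++ e) o.length = |mxo - mne| := by
        rw [badv_boundary o e hone, hheade, hlasto, abs_sub_comm]
      have hb2 : badv (e ++ o) e.length = |mxe - mno| := by
        rw [badv_boundary e o hene, hheado, hlaste, abs_sub_comm]
      rw [mfold] at hmo hme
      simp only [mfold] at *
      rw [hmo, hme]
      by_cases hA : |mxo - mne| = 1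
      · have c1 : check o e = 0 := check_eq_zero o e hone hene (by rw [hb1, hA])
        by_cases hB : |mxe - mno| = 1
        · have c2 : check e o = 0 := check_eq_zero e o hene hone (by rw [hb2, hB])
          simp only [← ho, ← he]
          simp [c1, c2, hA, hB]
        · have c2 : check e o = 1 := by
            apply check_eq_one e o 0 1 (he ▸ sorted_even_parity A.toList) (ho ▸ sorted_odd_parity A.toList)
            right; right
            rw [hb2]; exact hB
          simp only [← ho, ← he]
          simp [c1, c2, hA, hB]
      · have c1 : check o e = 1 := by
          apply check_eq_one o e 1 0 (ho ▸ sorted_odd_parity A.toList) (he ▸ sorted_even_parity A.toList)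
          right; right
          rw [hb1]; exact hA
        simp only [← ho, ← he]
        simp [c1, hA]
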